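-- pv_equiv track=rewrite | github.com/slavah8/leetcode | 2918-is-array-a-preorder-of-some-binary-tree/2918-is-array-a-preorder-of-some-binary-tree.py | isPreorder
-- ===== SOURCE A (Python) =====
-- from typing import List
--
-- def isPreorder(nodes: List[List[int]]) -> bool:
--
--     root_id, root_p = nodes[0]
--     if root_p != -1:
--         return False
--
--     stack = [root_id] # the current path from the root to the node you just read (root at bottom, current node at top).
--     seen = {root_id}
--
--
--     for k in range(1, len(nodes)):
--         node, parent = nodes[k]
--
--         if node in seen:
--             return False
--
--         seen.add(node)
--
--         while stack and stack[-1] != parent: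
--             stack.pop()
--
--         if not stack or stack[-1] != parent:
--             return False
--
--         stack.append(node)
--     return True
-- ===== SOURCE B (Python) =====
-- def isPreorder(nodes):
--     root_id, root_p = nodes[0]
--     if root_p != -1:
--         return False
--     # parent maps every id read so far to its parent id (None for the root).
--     parent = {root_id: None}
--     prev = root_id
--     for k in range(1, len(nodes)):
--         node, p = nodes[k]
--         if node in parent:
--             return False
--         # walk the ancestor chain of the previously read node looking for p
--         a = prev
--         while a is not None and a != p:
--             a = parent[a]
--         if a is None:
--             return False
--         parent[node] = p
--         prev = node
--     return True
-- ===== Notes on version B (the rewrite author's own statement) =====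
-- stated objective: alternative
-- what changed: A validates the preorder by maintaining the explicit root-to-current path as a mutable stack (popping on each step); B keeps no stack at all: it records every node's parent in a dict and, for each new entry, walks the previous node's ancestor chain lazily through the dict to find the claimed parent.
-- outside the precondition, e.g. on isPreorder([[1, -1], [2, 5], [3]]): A returns False, B returns False
import Mathlib
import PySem

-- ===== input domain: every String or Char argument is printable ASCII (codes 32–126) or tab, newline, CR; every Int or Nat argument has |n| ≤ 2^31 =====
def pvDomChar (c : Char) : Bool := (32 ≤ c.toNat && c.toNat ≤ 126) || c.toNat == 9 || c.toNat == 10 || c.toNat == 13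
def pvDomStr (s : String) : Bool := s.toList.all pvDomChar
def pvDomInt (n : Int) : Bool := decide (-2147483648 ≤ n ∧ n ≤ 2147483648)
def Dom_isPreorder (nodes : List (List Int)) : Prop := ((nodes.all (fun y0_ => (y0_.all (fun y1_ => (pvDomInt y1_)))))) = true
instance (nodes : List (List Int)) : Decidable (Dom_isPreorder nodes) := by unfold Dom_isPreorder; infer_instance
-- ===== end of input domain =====

-- B replaces A's explicit root-to-current path stack by a parent dictionary and, for each new
-- node, a lazy walk up the previous node's ancestor chain (objective: alternative decomposition).

-- ===== PORT A =====
-- 'while stack and stack[-1] != parent: stack.pop()'  (stack stored top-first)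
def popWhileA (parent : Int) : List Int → List Int
  | [] => []
  | t :: rest => if t ≠ parent then popWhileA parent rest else t :: rest

-- the 'for k in range(1, len(nodes))' loop of A over the remaining entries
def loopA : List (List Int) → List Int → PySem.Set Int → Bool
  | [], _, _ => true
  | e :: rest, stack, seen =>
    match e with
    | [node, parent] =>
      if PySem.Set.contains seen node then false
      else
        match popWhileA parent stack with
        | [] => false
        | t :: s' =>
          if t ≠ parent then false
          else loopA rest (node :: t :: s') (PySem.Set.add seen node)
    | _ => false  -- 'node, parent = nodes[k]' raises ValueError: excluded by Pre_ when reached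

def isPreorder (nodes : List (List Int)) : Bool :=
  match nodes with
  | [root_id, root_p] :: rest =>
    if root_p ≠ -1 then false
    else loopA rest [root_id] (PySem.Set.add PySem.Set.empty root_id)
  | _ => false  -- nodes[0] raises IndexError/ValueError here: excluded by Pre_

-- ===== PORT B =====
-- 'while a is not None and a != p: a = parent[a]' — the fuel only bounds the recursion
-- (the ancestor chain is acyclic and shorter than the dict, proved in the lemmas below);
-- parent[a] is getD with an unused default: every walked id is a key of the dict.
def walkB (d : PySem.Dict Int (Option Int)) (p : Int) : Nat → Option Int → Option Int
  | 0, a => a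
  | fuel + 1, a =>
    match a with
    | none => none
    | some x => if x = p then some x else walkB d p fuel (PySem.Dict.getD d x none)

-- the 'for k in range(1, len(nodes))' loop of B; prev is the previously read id
def loopB : List (List Int) → PySem.Dict Int (Option Int) → Int → Bool
  | [], _, _ => true
  | e :: rest, d, prev =>
    match e with
    | [node, p] =>
      if PySem.Dict.contains d node then false
      else
        match walkB d p d.items.length (some prev) with
        | none => false
        | some _ => loopB rest (PySem.Dict.insert d node (some p)) node
    | _ => false  -- 'node, p = nodes[k]' raises ValueError: excluded by Pre_ when reached

def isPreorder_alt (nodes : List (List Int)) : Bool :=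
  match nodes with
  | [root_id, root_p] :: rest =>
    if root_p ≠ -1 then false
    else loopB rest (PySem.Dict.insert PySem.Dict.empty root_id none) root_id
  | _ => false  -- nodes[0] raises IndexError/ValueError here: excluded by Pre_

-- ===== PRECONDITION & SPEC =====
-- Pre_ excludes the empty list (A raises IndexError on nodes[0]), a first entry that is not a
-- pair (ValueError), and — only when the root check passes — any later entry that is not a
-- pair: such an entry raises ValueError when reached, and when A fails before reaching it A
-- merely returns False (B returns False there too; see cites).
def Pre_isPreorder (nodes : List (List Int)) : Prop :=
  nodes ≠ [] ∧ nodes.headI.length = 2 ∧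
    (nodes.headI.getD 1 0 = -1 → ∀ e ∈ nodes, e.length = 2)
instance (nodes : List (List Int)) : Decidable (Pre_isPreorder nodes) := by
  unfold Pre_isPreorder; infer_instance

def pvWitness_isPreorder : List (List Int) := [[1, -1], [2, 1], [3, 1]]

def Spec_isPreorder (nodes : List (List Int)) (out : Bool) : Prop := out = isPreorder_alt nodes
instance (nodes : List (List Int)) (out : Bool) : Decidable (Spec_isPreorder nodes out) := by
  unfold Spec_isPreorder; infer_instance

-- ===== CLAIM (what is proved, stated in full; the proofs are below) =====
def Claim_equal_isPreorder : Prop :=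
  ∀ (nodes : List (List Int)), Dom_isPreorder nodes → Pre_isPreorder nodes →
    Spec_isPreorder nodes (isPreorder nodes)

-- ===== LEMMAS AND PROOFS =====

-- the stack of A, read top-first, is an ancestor chain of B's dict: each element maps to the
-- next one, the bottom (root) maps to none
def ChainD (d : PySem.Dict Int (Option Int)) : List Int → Prop
  | [] => True
  | [a] => PySem.Dict.getD d a none = none
  | a :: b :: t => PySem.Dict.getD d a none = some b ∧ ChainD d (b :: t)

lemma walk_none (d : PySem.Dict Int (Option Int)) (p : Int) :
    ∀ f, walkB d p f none = none := by
  intro f; cases f <;> simp [walkB]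

lemma pop_suffix (p : Int) : ∀ s, popWhileA p s <:+ s := by
  intro s; induction s with
  | nil => simp [popWhileA]
  | cons a t ih =>
    by_cases h : a = p
    · simp [popWhileA, h]
    · simpa [popWhileA, h] using ih.trans (List.suffix_cons a t)

lemma pop_head (p : Int) : ∀ s q t2, popWhileA p s = q :: t2 → q = p := by
  intro s; induction s with
  | nil => intro q t2 h; simp [popWhileA] at h
  | cons a t ih =>
    intro q t2 h
    by_cases ha : a = p
    · simp [popWhileA, ha] at h; omega
    · exact ih q t2 (by simpa [popWhileA, ha] using h)

lemma chain_tail (d : PySem.Dict Int (Option Int)) :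
    ∀ s a, ChainD d (a :: s) → ChainD d s := by
  intro s a h; cases s with
  | nil => trivial
  | cons b t => exact h.2

lemma chain_pop (d : PySem.Dict Int (Option Int)) (p : Int) :
    ∀ s, ChainD d s → ChainD d (popWhileA p s) := by
  intro s; induction s with
  | nil => intro h; simpa [popWhileA]
  | cons a t ih =>
    intro h
    by_cases ha : a = p
    · simpa [popWhileA, ha] using h
    · simpa [popWhileA, ha] using ih (chain_tail d t a h)

lemma chain_insert (d : PySem.Dict Int (Option Int)) (n : Int) (v : Option Int)
    (hn : PySem.Dict.contains d n = false) :
    ∀ s, (∀ x ∈ s, PySem.Dict.contains d x = true) → ChainD d s →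
      ChainD (PySem.Dict.insert d n v) s := by
  intro s; induction s with
  | nil => intro _ _; trivial
  | cons a t ih =>
    intro hm hc
    have hat := hm a (by simp)
    have hane : a ≠ n := fun he => by rw [he] at hat; simp [hat] at hn
    cases t with
    | nil => simpa [ChainD, PySem.Dict.getD_insert, if_neg hane] using hc
    | cons b t' =>
      exact ⟨by rw [PySem.Dict.getD_insert, if_neg hane]; exact hc.1,
             ih (fun x hx => hm x (List.mem_cons_of_mem a hx)) hc.2⟩

lemma walk_eq_pop (d : PySem.Dict Int (Option Int)) (p : Int) :
    ∀ (t : List Int) (a : Int) (f : Nat), ChainD d (a :: t) → (a :: t).length ≤ f →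
      walkB d p f (some a) =
        (match popWhileA p (a :: t) with | [] => none | q :: _ => some q) := by
  intro t
  induction t with
  | nil =>
    intro a f hc hf
    obtain ⟨f', rfl⟩ : ∃ f', f = f' + 1 := ⟨f - 1, by simp at hf; omega⟩
    by_cases hap : a = p
    · simp [walkB, popWhileA, hap]
    · simp [walkB, popWhileA, hap, ChainD] at *
      rw [hc]; exact walk_none d p f'
  | cons b t' ih =>
    intro a f hc hf
    obtain ⟨f', rfl⟩ : ∃ f', f = f' + 1 := ⟨f - 1, by simp at hf; omega⟩
    by_cases hap : a = p
    · simp [walkB, popWhileA, hap]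
    · have h1 : PySem.Dict.getD d a none = some b := hc.1
      simp only [walkB, hap, h1]
      rw [ih b f' hc.2 (by simpa using Nat.lt_succ_iff.mp (by simpa using hf))]
      simp [popWhileA, hap]

lemma stack_len_le (d : PySem.Dict Int (Option Int)) (s : List Int)
    (hnd : s.Nodup) (hm : ∀ x ∈ s, PySem.Dict.contains d x = true) :
    s.length ≤ d.items.length := by
  have hsub : s ⊆ d.keys := fun x hx => by
    have := hm x hx; rwa [PySem.Dict.contains_iff_mem_keys] at this
  have := (hnd.subperm hsub).length_le
  simpa [PySem.Dict.keys] using this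

lemma loop_eq :
    ∀ (rest : List (List Int)) (d : PySem.Dict Int (Option Int)) (a : Int) (t : List Int)
      (seen : PySem.Set Int),
      ChainD d (a :: t) → (a :: t).Nodup →
      (∀ x ∈ a :: t, PySem.Dict.contains d x = true) →
      (∀ x : Int, PySem.Set.contains seen x = PySem.Dict.contains d x) →
      loopA rest (a :: t) seen = loopB rest d a := by
  intro rest
  induction rest with
  | nil => intro _ _ _ _ _ _ _ _; rfl
  | cons e rest ih =>
    intro d a t seen hc hnd hm hseen
    match e with
    | [] => rfl
    | [_] => rfl
    | _ :: _ :: _ :: _ => rfl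
    | [node, p] =>
      simp only [loopA, loopB, hseen node]
      by_cases hcont : PySem.Dict.contains d node = true
      · simp [hcont]
      · have hcf : PySem.Dict.contains d node = false := by
          simpa using hcont
        have hlen : (a :: t).length ≤ d.items.length := stack_len_le d _ hnd hm
        rw [walk_eq_pop d p t a d.items.length hc hlen]
        simp only [hcf, Bool.false_eq_true, if_false]
        cases hpop : popWhileA p (a :: t) with
        | nil => simp
        | cons q t2 =>
          have hq : q = p := pop_head p _ q t2 hpop
          subst hq
          have hsuffix : q :: t2 <:+ a :: t := hpop ▸ pop_suffix q (a :: t)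
          have hm2 : ∀ x ∈ q :: t2, PySem.Dict.contains d x = true :=
            fun x hx => hm x (hsuffix.subset hx)
          have hnode_notin : node ∉ q :: t2 := by
            intro hx; rw [hm2 node hx] at hcf; exact absurd hcf (by simp)
          simp only [ne_eq, not_true_eq_false, if_false]
          apply ih (PySem.Dict.insert d node (some q)) node (q :: t2)
            (PySem.Set.add seen node)
          · refine ⟨PySem.Dict.getD_insert_self _ _ _ _, ?_⟩
            exact chain_insert d node (some q) hcf _ hm2
              (by have := chain_pop d q _ hc; rwa [hpop] at this)
          · exact List.nodup_cons.mpr ⟨hnode_notin, (hsuffix.sublist).nodup hnd⟩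
          · intro x hx
            rcases List.mem_cons.mp hx with hx1 | hx2
            · subst hx1; exact PySem.Dict.contains_insert_self _ _ _
            · rw [PySem.Dict.contains_insert]
              simp [hm2 x hx2]
          · intro x
            rw [Bool.eq_iff_iff]
            constructor
            · intro hx
              have : x ∈ PySem.Set.add seen node := by
                simpa using hx
              rcases (PySem.Set.mem_add _ _ _).mp this with h1 | h1
              · rw [PySem.Dict.contains_insert]
                have : PySem.Set.contains seen x = true := by simpa using h1
                rw [hseen x] at this; simp [this]
              · subst h1; exact PySem.Dict.contains_insert_self _ _ _
            · intro hx
              rw [PySem.Dict.contains_insert] at hx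
              rcases Bool.or_eq_true_iff.mp hx with h1 | h1
              · have : x = node := by simpa using h1
                subst this
                simp [PySem.Set.mem_add]
              · rw [← hseen x] at h1
                simp only [PySem.Set.contains_iff] at h1 ⊢
                exact (PySem.Set.mem_add _ _ _).mpr (Or.inl h1)

-- ===== VERDICT (by name: the statement is the Claim_ definition above) =====
theorem isPreorder_spec : Claim_equal_isPreorder := by
  intro nodes _ hpre
  unfold Spec_isPreorder
  obtain ⟨hne, hlen2, _⟩ := hpre
  match nodes with
  | [] => exact absurd rfl hne
  | e :: rest =>
    match e with
    | [] => simp [List.headI] at hlen2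
    | [_] => simp [List.headI] at hlen2
    | _ :: _ :: _ :: _ => simp [List.headI] at hlen2
    | [r, rp] =>
      by_cases hrp : rp = -1
      · subst hrp
        simp only [isPreorder, isPreorder_alt, ne_eq, not_true_eq_false, if_false]
        apply loop_eq rest (PySem.Dict.insert PySem.Dict.empty r none) r [] _
        · show PySem.Dict.getD (PySem.Dict.insert PySem.Dict.empty r none) r none = none
          exact PySem.Dict.getD_insert_self _ _ _ _
        · simp
        · intro x hx
          have : x = r := by simpa using hx
          subst this; exact PySem.Dict.contains_insert_self _ _ _
        · intro x
          rw [Bool.eq_iff_iff, PySem.Dict.contains_insert]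
          constructor
          · intro hx
            have : x ∈ PySem.Set.add PySem.Set.empty r := by simpa using hx
            rcases (PySem.Set.mem_add _ _ _).mp this with h1 | h1
            · simp [PySem.Set.empty] at h1
            · simp [h1]
          · intro hx
            have : x = r := by
              rcases Bool.or_eq_true_iff.mp hx with h1 | h1
              · simpa using h1
              · simp [PySem.Dict.contains_empty] at h1
            subst this
            simp
      · simp [isPreorder, isPreorder_alt, hrp]
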